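-- pv_equiv track=rewrite | github.com/bsw30/INFSCI0201 | Lab11/task01.py | zipmap
-- ===== SOURCE A (Python) =====
-- def zipmap(key_list, value_list, override=False):
--     # If False, check duplicate keys and return empty if found
--     if not override and len(set(key_list)) != len(key_list):
--         return {}
--
--     result = dict(map(lambda pair: (pair[0], pair[1]), zip(key_list, value_list)))
--
--     if len(key_list) > len(value_list):
--         extra_keys = key_list[len(value_list):]
--         result.update({key: None for key in extra_keys})
--
--     return result
-- ===== SOURCE B (Python) =====
-- def zipmap(key_list, value_list, override=False):
--     if not override and len(set(key_list)) != len(key_list):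
--         return {}
--     result = {}
--     n = len(value_list)
--     for i, key in enumerate(key_list):
--         result[key] = value_list[i] if i < n else None
--     return result
-- ===== Notes on version B (the rewrite author's own statement) =====
-- stated objective: simpler
-- what changed: Replaces A's two-phase build (dict over zip, then a separate None-padding dict-comprehension update) with a single indexed pass over the keys that assigns value_list[i] or None directly.
import Mathlib
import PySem

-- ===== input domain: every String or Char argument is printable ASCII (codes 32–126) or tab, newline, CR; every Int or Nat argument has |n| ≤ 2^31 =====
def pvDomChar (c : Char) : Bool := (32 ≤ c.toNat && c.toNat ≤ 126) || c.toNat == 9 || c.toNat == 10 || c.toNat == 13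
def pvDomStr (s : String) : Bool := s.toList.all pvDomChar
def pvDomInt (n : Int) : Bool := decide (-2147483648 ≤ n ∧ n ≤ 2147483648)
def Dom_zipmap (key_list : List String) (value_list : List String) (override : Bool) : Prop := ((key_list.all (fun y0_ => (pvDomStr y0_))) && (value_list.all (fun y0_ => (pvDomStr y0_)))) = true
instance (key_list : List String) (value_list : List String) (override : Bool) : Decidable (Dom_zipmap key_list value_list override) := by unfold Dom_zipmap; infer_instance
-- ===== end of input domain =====

-- B builds the dict in one indexed pass over the keys instead of A's zip-build plus None-padding update (objective: simpler).

-- ===== PORT A =====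
def zipmap (key_list : List String) (value_list : List String) (override : Bool) : List (String × Option String) :=
  if !override && ((PySem.Set.ofList key_list).length ≠ key_list.length) then
    []
  else
    let result : PySem.Dict String (Option String) :=
      PySem.Dict.ofList ((key_list.zip value_list).map (fun pair => (pair.1, some pair.2)))
    let result :=
      if key_list.length > value_list.length then
        let extra_keys := PySem.List.slice key_list (some (value_list.length : Int)) none
        result.update (extra_keys.map (fun key => (key, (none : Option String))))
      else result
    result.items

-- ===== PORT B =====
def zipmap_alt (key_list : List String) (value_list : List String) (override : Bool) : List (String × Option String) :=
  if !override && ((PySem.Set.ofList key_list).length ≠ key_list.length) then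
    []
  else
    let n : Int := value_list.length
    let result : PySem.Dict String (Option String) :=
      (PySem.List.enumerate key_list 0).foldl
        (fun d p => d.insert p.2 (if p.1 < n then some (PySem.List.pyGetD value_list p.1 "") else none))
        PySem.Dict.empty
    result.items

-- ===== PRECONDITION & SPEC =====
def Spec_zipmap (key_list : List String) (value_list : List String) (override : Bool) (out : List (String × Option String)) : Prop := out = zipmap_alt key_list value_list override
instance (key_list : List String) (value_list : List String) (override : Bool) (out : List (String × Option String)) : Decidable (Spec_zipmap key_list value_list override out) := by unfold Spec_zipmap; infer_instance

-- ===== CLAIM (what is proved, stated in full; the proofs are below) =====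
def Claim_equal_zipmap : Prop := ∀ (key_list : List String) (value_list : List String) (override : Bool), Dom_zipmap key_list value_list override → Spec_zipmap key_list value_list override (zipmap key_list value_list override)

-- ===== LEMMAS AND PROOFS =====

-- B's insert sequence, read off the enumeration from index n, is A's zip part (over the
-- values from index n on) followed by A's None-padding part.
theorem pv_enum_pairs (v : List String) : ∀ (k : List String) (n : Nat),
    (PySem.List.enumerate k (n : Int)).map
        (fun p => (p.2, if p.1 < (v.length : Int) then some (PySem.List.pyGetD v p.1 "") else (none : Option String)))
      = (k.zip (v.drop n)).map (fun pair => (pair.1, some pair.2))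
        ++ (k.drop ((v.drop n).length)).map (fun key => (key, (none : Option String))) := by
  intro k
  induction k with
  | nil => intro n; simp [PySem.List.enumerate_nil]
  | cons key ks ih =>
    intro n
    rw [PySem.List.enumerate_cons]
    by_cases h : n < v.length
    · have hdrop : v.drop n = v[n] :: v.drop (n + 1) := List.drop_eq_getElem_cons h
      have hcast : ((n : Int) + 1) = ((n + 1 : Nat) : Int) := by push_cast; ring
      simp only [List.map_cons, hcast, ih (n + 1), hdrop]
      have hlen : (v[n] :: v.drop (n + 1)).length = v.length - n := by simp only [List.length_cons, List.length_drop]; omega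
      simp only [hlen, List.zip_cons_cons, List.map_cons, List.cons_append]
      have hhead : (if (n : Int) < (v.length : Int) then some (PySem.List.pyGetD v (n : Int) "") else (none : Option String)) = some v[n] := by
        rw [if_pos (by exact_mod_cast h)]
        simp [PySem.List.pyGetD_natCast, List.getD_eq_getElem?_getD, List.getElem?_eq_getElem h]
      have htail : (key :: ks).drop (v.length - n) = ks.drop ((v.drop (n + 1)).length) := by
        have h1 : v.length - n = (v.length - n - 1) + 1 := by omega
        rw [h1, List.drop_succ_cons]
        congr 1
        simp only [List.length_drop]
        omega
      rw [hhead, htail]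
    · have hdrop : v.drop n = [] := List.drop_eq_nil_of_le (by omega)
      have hcast : ((n : Int) + 1) = ((n + 1 : Nat) : Int) := by push_cast; ring
      simp only [List.map_cons, hcast, ih (n + 1), hdrop,
        List.drop_eq_nil_of_le (show v.length ≤ n + 1 by omega)]
      simp only [List.zip_nil_right, List.map_nil, List.nil_append, List.length_nil,
        List.drop_zero, List.map_cons]
      rw [if_neg (by exact_mod_cast h)]

theorem pv_dict_eq (k v : List String) :
    (PySem.List.enumerate k 0).foldl
        (fun d p => d.insert p.2 (if p.1 < (v.length : Int) then some (PySem.List.pyGetD v p.1 "") else none))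
        PySem.Dict.empty
      = ((k.zip v).map (fun pair => (pair.1, some pair.2))
          ++ (k.drop v.length).map (fun key => (key, (none : Option String)))).foldl
          (fun d p => d.insert p.1 p.2) PySem.Dict.empty := by
  have h := pv_enum_pairs v k 0
  simp only [Nat.cast_zero, List.drop_zero] at h
  rw [← h, List.foldl_map]

-- ===== VERDICT (by name: the statement is the Claim_ definition above) =====
theorem zipmap_spec : Claim_equal_zipmap := by
  intro key_list value_list override _
  unfold Spec_zipmap zipmap zipmap_alt
  by_cases hg : (!override && decide ((PySem.Set.ofList key_list).length ≠ key_list.length)) = true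
  · rw [if_pos hg, if_pos hg]
  · rw [if_neg hg, if_neg hg]
    dsimp only
    rw [pv_dict_eq key_list value_list]
    by_cases hlen : key_list.length > value_list.length
    · rw [if_pos hlen, PySem.List.slice_from_natCast]
      rw [List.foldl_append]
      rfl
    · rw [if_neg hlen]
      rw [List.drop_eq_nil_of_le (by omega), List.map_nil, List.append_nil]
      rfl
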